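-- pv_equiv track=rewrite | github.com/thu-nics/C2C | rosetta/model/aligner.py | _build_token_mask_from_spans
-- ===== SOURCE A (Python) =====
-- from typing import List, Tuple, Optional, Dict, Literal, Union
--
-- def _build_token_mask_from_spans(
--     offsets: Optional[List[Tuple[int, int]]],
--     num_tokens: int,
--     spans: List[Tuple[int, int]]
-- ) -> List[bool]:
--     """
--     Build a boolean mask for tokens whose offset range overlaps any span.
--     If offsets are missing, default to all False.
--     """
--     if not offsets or len(offsets) != num_tokens:
--         return [False] * num_tokens
--     mask: List[bool] = []
--     for (start, end) in offsets:
--         if end <= start: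
--             mask.append(False)
--             continue
--         is_msg = False
--         for s, e in spans:
--             # overlap check
--             if start < e and end > s:
--                 is_msg = True
--                 break
--         mask.append(is_msg)
--     return mask
-- ===== SOURCE B (Python) =====
-- from bisect import bisect_left
-- from typing import List, Tuple, Optional
--
--
-- def _build_token_mask_from_spans(
--     offsets: Optional[List[Tuple[int, int]]],
--     num_tokens: int,
--     spans: List[Tuple[int, int]]
-- ) -> List[bool]:
--     """Same mask, via a sorted span index: sort spans by start once, keep a
--     running prefix-maximum of span ends, then answer each token with one
--     binary search instead of scanning all spans."""
--     if not offsets or len(offsets) != num_tokens: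
--         return [False] * num_tokens
--     starts: List[int] = []
--     pmax: List[int] = []
--     best = None
--     for s, e in sorted(spans, key=lambda t: t[0]):
--         starts.append(s)
--         best = e if best is None or e > best else best
--         pmax.append(best)
--     mask: List[bool] = []
--     for start, end in offsets:
--         if end <= start:
--             mask.append(False)
--         else:
--             k = bisect_left(starts, end)
--             mask.append(k > 0 and pmax[k - 1] > start)
--     return mask
-- ===== Notes on version B (the rewrite author's own statement) =====
-- stated objective: faster
-- what changed: Replaces the per-token scan over all spans by a precomputed index: spans sorted by start with a prefix-maximum of ends, so each token is answered with one binary search.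
import Mathlib
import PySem

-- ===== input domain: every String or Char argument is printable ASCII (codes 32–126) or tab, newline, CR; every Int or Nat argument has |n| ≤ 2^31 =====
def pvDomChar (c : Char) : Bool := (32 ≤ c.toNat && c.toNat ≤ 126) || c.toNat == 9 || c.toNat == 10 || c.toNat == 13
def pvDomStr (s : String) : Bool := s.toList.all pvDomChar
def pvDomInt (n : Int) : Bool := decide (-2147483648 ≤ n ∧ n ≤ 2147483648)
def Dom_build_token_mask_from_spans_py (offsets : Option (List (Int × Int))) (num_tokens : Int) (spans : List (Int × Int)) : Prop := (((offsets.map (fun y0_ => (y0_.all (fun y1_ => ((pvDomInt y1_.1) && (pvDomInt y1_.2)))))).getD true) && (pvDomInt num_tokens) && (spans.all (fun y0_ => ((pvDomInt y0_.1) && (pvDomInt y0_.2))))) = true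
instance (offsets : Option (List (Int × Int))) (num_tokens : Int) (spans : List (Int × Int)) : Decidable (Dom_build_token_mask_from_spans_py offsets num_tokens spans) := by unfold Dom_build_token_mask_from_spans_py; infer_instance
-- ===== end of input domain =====

-- B replaces A's per-token scan over all spans by a sorted span index with a
-- prefix-maximum of span ends and one binary search per token (objective: faster).

-- ===== PORT A =====
-- A's inner 'for s, e in spans: … break' loop
def pvInnerA (start e_ : Int) : List (Int × Int) → Bool
  | [] => false
  | (s, e) :: rest => if start < e ∧ e_ > s then true else pvInnerA start e_ rest

def build_token_mask_from_spans_py (offsets : Option (List (Int × Int))) (num_tokens : Int) (spans : List (Int × Int)) : List Bool :=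
  match offsets with
  | none => List.replicate num_tokens.toNat false
  | some offs =>
    if offs = [] ∨ (offs.length : Int) ≠ num_tokens then
      List.replicate num_tokens.toNat false
    else
      offs.foldl (fun mask p =>
        if p.2 ≤ p.1 then mask ++ [false]
        else mask ++ [pvInnerA p.1 p.2 spans]) []

-- ===== PORT B =====
-- B's single pass over the sorted spans building starts / pmax / best
def pvStep (acc : List Int × List Int × Option Int) (t : Int × Int) : List Int × List Int × Option Int :=
  let best : Int :=
    match acc.2.2 with
    | none => t.2
    | some b => if t.2 > b then t.2 else b
  (acc.1 ++ [t.1], acc.2.1 ++ [best], some best)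

def pvIndexB (sp : List (Int × Int)) : List Int × List Int × Option Int :=
  sp.foldl pvStep ([], [], none)

def build_token_mask_from_spans_py_alt (offsets : Option (List (Int × Int))) (num_tokens : Int) (spans : List (Int × Int)) : List Bool :=
  match offsets with
  | none => List.replicate num_tokens.toNat false
  | some offs =>
    if offs = [] ∨ (offs.length : Int) ≠ num_tokens then
      List.replicate num_tokens.toNat false
    else
      let idx := pvIndexB (PySem.List.sorted spans (fun t => t.1) false)
      let starts := idx.1
      let pmax := idx.2.1
      offs.foldl (fun mask p =>
        if p.2 ≤ p.1 then mask ++ [false]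
        else
          let k := PySem.List.bisectLeft starts p.2
          mask ++ [decide (0 < k) && decide (p.1 < pmax.getD (k - 1) 0)]) []

-- ===== PRECONDITION & SPEC =====
def Spec_build_token_mask_from_spans_py (offsets : Option (List (Int × Int))) (num_tokens : Int) (spans : List (Int × Int)) (out : List Bool) : Prop := out = build_token_mask_from_spans_py_alt offsets num_tokens spans
instance (offsets : Option (List (Int × Int))) (num_tokens : Int) (spans : List (Int × Int)) (out : List Bool) : Decidable (Spec_build_token_mask_from_spans_py offsets num_tokens spans out) := by unfold Spec_build_token_mask_from_spans_py; infer_instance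

-- ===== CLAIM (what is proved, stated in full; the proofs are below) =====
def Claim_equal_build_token_mask_from_spans_py : Prop := ∀ (offsets : Option (List (Int × Int))) (num_tokens : Int) (spans : List (Int × Int)), Dom_build_token_mask_from_spans_py offsets num_tokens spans → Spec_build_token_mask_from_spans_py offsets num_tokens spans (build_token_mask_from_spans_py offsets num_tokens spans)

-- ===== LEMMAS AND PROOFS =====

-- A's inner loop is an existence test over the span list
lemma pvInnerA_eq_any (start e_ : Int) (l : List (Int × Int)) :
    pvInnerA start e_ l = l.any (fun t => decide (start < t.2) && decide (e_ > t.1)) := by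
  induction l with
  | nil => rfl
  | cons t rest ih =>
    obtain ⟨s, e⟩ := t
    by_cases h : start < e ∧ e_ > s <;> simp_all [pvInnerA]

-- the running prefix-maximum entries of B's single pass, after the first span
def pvScan (b : Int) : List (Int × Int) → List Int
  | [] => []
  | t :: r => (max b t.2) :: pvScan (max b t.2) r

-- the full pmax list B builds
def pvScanTop : List (Int × Int) → List Int
  | [] => []
  | t :: r => t.2 :: pvScan t.2 r

lemma pvGetLastD_cons (a : Int) (s : List Int) (b c : Int) :
    (a :: s).getLast?.getD b = (a :: s).getLast?.getD c := by
  induction s generalizing a with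
  | nil => rfl
  | cons x r ih => simpa using ih x

lemma pvStep_some (xs ys : List Int) (b : Int) (t : Int × Int) :
    pvStep (xs, ys, some b) t = (xs ++ [t.1], ys ++ [max b t.2], some (max b t.2)) := by
  have hmax : (if t.2 > b then t.2 else b) = max b t.2 := by
    by_cases h : t.2 > b <;> simp [h] <;> omega
  simp [pvStep, hmax]

lemma pvIndexB_fold (l : List (Int × Int)) (xs ys : List Int) (b : Int) :
    l.foldl pvStep (xs, ys, some b)
      = (xs ++ l.map (fun t => t.1), ys ++ pvScan b l, some ((pvScan b l).getLastD b)) := by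
  induction l generalizing xs ys b with
  | nil => simp [pvScan]
  | cons t r ih =>
    rw [List.foldl_cons, pvStep_some, ih]
    simp only [pvScan, Prod.mk.injEq]
    refine ⟨by simp, by simp, ?_⟩
    cases hs : pvScan (max b t.2) r with
    | nil => simp
    | cons a s =>
      simp only [List.getLastD_eq_getLast?, List.getLast?_cons_cons]
      exact congrArg some (pvGetLastD_cons a s (max b t.2) b)

lemma pvIndexB_cons (t : Int × Int) (r : List (Int × Int)) :
    pvIndexB (t :: r) = (t.1 :: r.map (fun t => t.1), t.2 :: pvScan t.2 r,
      some ((pvScan t.2 r).getLastD t.2)) := by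
  unfold pvIndexB
  rw [List.foldl_cons]
  have h0 : pvStep ([], [], none) t = ([t.1], [t.2], some t.2) := by simp [pvStep]
  rw [h0, pvIndexB_fold]
  simp

lemma pvIndexB_fst (l : List (Int × Int)) : (pvIndexB l).1 = l.map (fun t => t.1) := by
  cases l with
  | nil => rfl
  | cons t r => rw [pvIndexB_cons]; rfl

lemma pvIndexB_pmax (l : List (Int × Int)) : (pvIndexB l).2.1 = pvScanTop l := by
  cases l with
  | nil => rfl
  | cons t r => rw [pvIndexB_cons]; rfl

lemma pvScan_getD (l : List (Int × Int)) (b : Int) (j : Nat) (hj : j < l.length) :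
    (pvScan b l).getD j 0 = ((l.take (j + 1)).map (fun t => t.2)).foldl max b := by
  induction l generalizing b j with
  | nil => simp at hj
  | cons t r ih =>
    cases j with
    | zero => simp [pvScan]
    | succ j => simpa [pvScan] using ih (max b t.2) j (by simpa using hj)

lemma le_foldl_max_self (b : Int) (es : List Int) : b ≤ es.foldl max b := by
  induction es generalizing b with
  | nil => simp
  | cons x r ih => exact le_trans (le_max_left b x) (ih (max b x))

lemma mem_le_foldl_max (b : Int) (es : List Int) (x : Int) (hx : x ∈ es) : x ≤ es.foldl max b := by
  induction es generalizing b with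
  | nil => simp at hx
  | cons y r ih =>
    rcases List.mem_cons.mp hx with rfl | hx
    · exact le_trans (le_max_right b x) (le_foldl_max_self _ _)
    · exact ih (max b y) hx

lemma foldl_max_attained (b : Int) (es : List Int) :
    es.foldl max b = b ∨ es.foldl max b ∈ es := by
  induction es generalizing b with
  | nil => left; rfl
  | cons x r ih =>
    rcases ih (max b x) with h | h
    · by_cases hxb : x ≤ b
      · left; rw [List.foldl_cons, h]; omega
      · right
        rw [List.foldl_cons, h]
        have hm : max b x = x := by omega
        rw [hm]
        exact List.mem_cons_self
    · right; exact List.mem_cons_of_mem _ h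

-- upper-bound and attainment facts for the pmax entries
lemma pvScanTop_ub (l : List (Int × Int)) (j : Nat) (hj : j < l.length)
    (x : Int) (hx : x ∈ (l.take (j + 1)).map (fun t => t.2)) :
    x ≤ (pvScanTop l).getD j 0 := by
  cases l with
  | nil => simp at hj
  | cons t r =>
    cases j with
    | zero =>
      simp only [List.take, List.map] at hx
      simp at hx
      simp [pvScanTop, hx]
    | succ j =>
      have hjr : j < r.length := by simpa using hj
      have hstep : (pvScanTop (t :: r)).getD (j + 1) 0 = (pvScan t.2 r).getD j 0 := by
        simp [pvScanTop]
      rw [hstep, pvScan_getD r t.2 j hjr]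
      simp only [List.take_succ_cons, List.map_cons, List.mem_cons] at hx
      rcases hx with rfl | hx
      · exact le_foldl_max_self _ _
      · exact mem_le_foldl_max _ _ _ hx

lemma pvScanTop_mem (l : List (Int × Int)) (j : Nat) (hj : j < l.length) :
    (pvScanTop l).getD j 0 ∈ (l.take (j + 1)).map (fun t => t.2) := by
  cases l with
  | nil => simp at hj
  | cons t r =>
    cases j with
    | zero => simp [pvScanTop]
    | succ j =>
      have hjr : j < r.length := by simpa using hj
      have hstep : (pvScanTop (t :: r)).getD (j + 1) 0 = (pvScan t.2 r).getD j 0 := by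
        simp [pvScanTop]
      rw [hstep, pvScan_getD r t.2 j hjr]
      simp only [List.take_succ_cons, List.map_cons, List.mem_cons]
      rcases foldl_max_attained t.2 ((r.take (j + 1)).map (fun t => t.2)) with h | h
      · left; exact h
      · right; exact h

-- the heart: A's existence test over the spans equals B's binary-search answer
lemma pvToken_eq (spans : List (Int × Int)) (start e_ : Int) :
    pvInnerA start e_ spans =
      (decide (0 < PySem.List.bisectLeft ((pvIndexB (PySem.List.sorted spans (fun t => t.1) false)).1) e_) &&
       decide (start < ((pvIndexB (PySem.List.sorted spans (fun t => t.1) false)).2.1).getD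
         (PySem.List.bisectLeft ((pvIndexB (PySem.List.sorted spans (fun t => t.1) false)).1) e_ - 1) 0)) := by
  have hfst := pvIndexB_fst (PySem.List.sorted spans (fun t => t.1) false)
  have hpm := pvIndexB_pmax (PySem.List.sorted spans (fun t => t.1) false)
  rw [hfst, hpm, pvInnerA_eq_any]
  set sp := PySem.List.sorted spans (fun t => t.1) false with hsp
  set starts := sp.map (fun t => t.1) with hstarts
  set k := PySem.List.bisectLeft starts e_ with hk
  have hpw : starts.Pairwise (fun a b => a ≤ b) := PySem.List.sorted_map_key_pairwise spans (fun t => t.1)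
  obtain ⟨hk_le, hlt, hge⟩ := PySem.List.bisectLeft_spec starts e_ hpw
  have hlen : starts.length = sp.length := by simp [hstarts]
  rw [Bool.eq_iff_iff]
  simp only [List.any_eq_true, Bool.and_eq_true, decide_eq_true_eq]
  constructor
  · rintro ⟨t, ht, h1, h2⟩
    rw [← PySem.List.mem_sorted spans (fun t => t.1) false, ← hsp] at ht
    obtain ⟨j, hjlen, rfl⟩ := List.mem_iff_getElem.mp ht
    have hjs : j < starts.length := by omega
    have hjk : j < k := by
      by_contra hc
      have := hge j hjs (by omega)
      have : starts[j] = (sp[j]).1 := by simp [hstarts]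
      omega
    have hk0 : 0 < k := by omega
    have hk1 : k - 1 < sp.length := by omega
    refine ⟨hk0, ?_⟩
    have hmem : (sp[j]).2 ∈ (sp.take (k - 1 + 1)).map (fun t => t.2) := by
      have hkk : k - 1 + 1 = k := by omega
      rw [hkk]
      refine List.mem_map.mpr ⟨sp[j], ?_, rfl⟩
      have hjt : j < (sp.take k).length := by simp; omega
      exact List.mem_iff_getElem.mpr ⟨j, hjt, by simp⟩
    have := pvScanTop_ub sp (k - 1) hk1 _ hmem
    omega
  · rintro ⟨hk0, hlt2⟩
    have hk1 : k - 1 < sp.length := by omega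
    have hmem := pvScanTop_mem sp (k - 1) hk1
    obtain ⟨t, htk, hte⟩ := List.mem_map.mp hmem
    obtain ⟨j, hjlen, rfl⟩ := List.mem_iff_getElem.mp htk
    have hjlen' : j < sp.length := by
      have := List.length_take_le (k - 1 + 1) sp
      omega
    have hjk : j < k := by
      have : (sp.take (k - 1 + 1)).length ≤ k - 1 + 1 := List.length_take_le _ _
      omega
    have hjs : j < starts.length := by omega
    have hsj : starts[j] = ((sp.take (k - 1 + 1))[j]).1 := by simp [hstarts]
    have hstart : starts[j] < e_ := hlt j hjs hjk
    refine ⟨(sp.take (k - 1 + 1))[j], ?_, by omega, by omega⟩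
    rw [← PySem.List.mem_sorted spans (fun t => t.1) false, ← hsp]
    exact List.mem_of_mem_take (List.getElem_mem hjlen)

-- ===== VERDICT (by name: the statement is the Claim_ definition above) =====
theorem build_token_mask_from_spans_py_spec : Claim_equal_build_token_mask_from_spans_py := by
  intro offsets num_tokens spans _
  unfold Spec_build_token_mask_from_spans_py
  unfold build_token_mask_from_spans_py build_token_mask_from_spans_py_alt
  cases offsets with
  | none => rfl
  | some offs =>
    by_cases hg : offs = [] ∨ (offs.length : Int) ≠ num_tokens
    · simp only [hg, if_true]
    · simp only [hg, if_false]
      have hA : (fun (mask : List Bool) (p : Int × Int) =>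
          if p.2 ≤ p.1 then mask ++ [false] else mask ++ [pvInnerA p.1 p.2 spans])
          = fun mask p => mask ++ [if p.2 ≤ p.1 then false else pvInnerA p.1 p.2 spans] := by
        funext mask p; split <;> rfl
      have hB : (fun (mask : List Bool) (p : Int × Int) =>
          if p.2 ≤ p.1 then mask ++ [false]
          else
            mask ++ [decide (0 < PySem.List.bisectLeft ((pvIndexB (PySem.List.sorted spans (fun t => t.1) false)).1) p.2) &&
              decide (p.1 < ((pvIndexB (PySem.List.sorted spans (fun t => t.1) false)).2.1).getD
                (PySem.List.bisectLeft ((pvIndexB (PySem.List.sorted spans (fun t => t.1) false)).1) p.2 - 1) 0)])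
          = fun mask p => mask ++ [if p.2 ≤ p.1 then false
            else decide (0 < PySem.List.bisectLeft ((pvIndexB (PySem.List.sorted spans (fun t => t.1) false)).1) p.2) &&
              decide (p.1 < ((pvIndexB (PySem.List.sorted spans (fun t => t.1) false)).2.1).getD
                (PySem.List.bisectLeft ((pvIndexB (PySem.List.sorted spans (fun t => t.1) false)).1) p.2 - 1) 0)] := by
        funext mask p; split <;> rfl
      show offs.foldl _ [] = offs.foldl _ []
      rw [hA, hB, PySem.List.foldl_append_singleton_eq_map, PySem.List.foldl_append_singleton_eq_map]
      simp only [List.nil_append]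
      apply List.map_congr_left
      intro p _
      split
      · rfl
      · exact pvToken_eq spans p.1 p.2
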